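-- pv_equiv track=rewrite | github.com/pypi-data/pypi-mirror-124 | packages/aislab/aislab-0.0.5.tar.gz/aislab-0.0.5/aislab/op_nlopt/ga.py | func_sim
-- ===== SOURCE A (Python) =====
-- def func_sim(max_F, itrConstF):
--     result = False
--     br = 0
--     for i in range(len(max_F) - 1):
--         if max_F[i] == max_F[i + 1]:
--             br += 1
--         else:
--             br = 0
--     if br == itrConstF - 1: result = True
--     return result
-- ===== SOURCE B (Python) =====
-- def func_sim(max_F, itrConstF):
--     # Count the trailing run of equal adjacent values by scanning the
--     # reversed list's leading pairs, then compare once.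
--     t = 0
--     rev = max_F[::-1]
--     for a, b in zip(rev, rev[1:]):
--         if a != b:
--             break
--         t += 1
--     return t == itrConstF - 1
-- ===== Notes on version B (the rewrite author's own statement) =====
-- stated objective: alternative
-- what changed: Replaces A's full forward scan with a resetting counter by a backward pass that counts only the trailing run of equal adjacent values (reverse, count leading equal pairs, stop at first inequality).
import Mathlib
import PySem

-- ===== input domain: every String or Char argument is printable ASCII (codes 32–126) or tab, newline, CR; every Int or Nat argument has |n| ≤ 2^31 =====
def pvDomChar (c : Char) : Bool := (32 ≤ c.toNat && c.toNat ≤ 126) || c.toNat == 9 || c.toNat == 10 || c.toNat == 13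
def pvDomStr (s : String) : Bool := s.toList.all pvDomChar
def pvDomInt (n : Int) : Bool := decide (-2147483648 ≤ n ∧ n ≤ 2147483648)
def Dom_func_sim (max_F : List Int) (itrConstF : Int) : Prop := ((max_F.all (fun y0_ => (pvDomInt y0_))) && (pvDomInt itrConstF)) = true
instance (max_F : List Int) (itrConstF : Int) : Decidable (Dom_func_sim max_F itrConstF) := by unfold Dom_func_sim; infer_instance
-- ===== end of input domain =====

-- B replaces A's full forward scan (resetting counter) with a backward count of only the trailing run of equal adjacent values; same return value everywhere.


-- ===== PORT A =====
-- A: forward scan over adjacent indices with a counter that resets on inequality.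
-- All indices accessed are in range, so getD's default is never used.
def func_sim (max_F : List Int) (itrConstF : Int) : Bool :=
  let br : Int := (List.range (max_F.length - 1)).foldl
    (fun br i => if max_F.getD i 0 = max_F.getD (i + 1) 0 then br + 1 else (0 : Int)) 0
  decide (br = itrConstF - 1)

-- ===== PORT B =====
-- B: count the leading equal adjacent pairs of the reversed list (= trailing run of A's input).
def tcount : List Int → Int
  | a :: b :: t => if a = b then 1 + tcount (b :: t) else 0
  | _ => 0

def func_sim_alt (max_F : List Int) (itrConstF : Int) : Bool :=
  decide (tcount max_F.reverse = itrConstF - 1)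

-- ===== PRECONDITION & SPEC =====
def Spec_func_sim (max_F : List Int) (itrConstF : Int) (out : Bool) : Prop := out = func_sim_alt max_F itrConstF
instance (max_F : List Int) (itrConstF : Int) (out : Bool) : Decidable (Spec_func_sim max_F itrConstF out) := by unfold Spec_func_sim; infer_instance

-- ===== CLAIM (what is proved, stated in full; the proofs are below) =====
def Claim_equal_func_sim : Prop := ∀ (max_F : List Int) (itrConstF : Int), Dom_func_sim max_F itrConstF → Spec_func_sim max_F itrConstF (func_sim max_F itrConstF)

-- ===== LEMMAS AND PROOFS =====

-- ===== VERDICT (by name: the statement is the Claim_ definition above) =====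

def brFold (l : List Int) : Int :=
  (List.range (l.length - 1)).foldl
    (fun br i => if l.getD i 0 = l.getD (i + 1) 0 then br + 1 else (0 : Int)) 0

theorem brFold_eq_tcount_reverse (l : List Int) : brFold l = tcount l.reverse := by
  induction l using List.reverseRecOn with
  | nil => simp [brFold, tcount]
  | append_singleton l x ih =>
    rcases l.eq_nil_or_concat with h | ⟨l', y, rfl⟩
    · subst h; simp [brFold, tcount]
    · simp only [List.concat_eq_append] at ih ⊢
      have hlen : (l' ++ [y]).length - 1 + 1 = (l' ++ [y] ++ [x]).length - 1 := by
        simp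
      unfold brFold
      rw [← hlen, List.range_succ, List.foldl_append]
      have hstep : ∀ i ∈ List.range ((l' ++ [y]).length - 1), ∀ br : Int,
          (if (l' ++ [y] ++ [x]).getD i 0 = (l' ++ [y] ++ [x]).getD (i + 1) 0 then br + 1 else (0:Int))
          = (if (l' ++ [y]).getD i 0 = (l' ++ [y]).getD (i + 1) 0 then br + 1 else (0:Int)) := by
        intro i hi br
        have hi' : i < (l' ++ [y]).length - 1 := List.mem_range.mp hi
        have h1 : i < (l' ++ [y]).length := by omega
        have h2 : i + 1 < (l' ++ [y]).length := by
          simp at h1 hi' ⊢; omega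
        rw [List.getD_append _ _ _ _ h1, List.getD_append _ _ _ _ h2]
      have hcongr : ∀ (b : Int),
          (List.range ((l' ++ [y]).length - 1)).foldl
            (fun br i => if (l' ++ [y] ++ [x]).getD i 0 = (l' ++ [y] ++ [x]).getD (i + 1) 0 then br + 1 else (0:Int)) b
          = (List.range ((l' ++ [y]).length - 1)).foldl
            (fun br i => if (l' ++ [y]).getD i 0 = (l' ++ [y]).getD (i + 1) 0 then br + 1 else (0:Int)) b := by
        intro b
        apply PySem.List.foldl_congr_mem
        intro br i hi
        exact hstep i hi br
      rw [hcongr]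
      simp only [List.foldl_cons, List.foldl_nil]
      have hlast : (l' ++ [y] ++ [x]).getD ((l' ++ [y]).length - 1) 0 = y ∧
                   (l' ++ [y] ++ [x]).getD ((l' ++ [y]).length - 1 + 1) 0 = x := by
        constructor
        · have : (l' ++ [y]).length - 1 < (l' ++ [y]).length := by simp
          rw [List.getD_append _ _ _ _ this]
          simp [List.getD]
        · have : (l' ++ [y]).length - 1 + 1 = (l' ++ [y]).length := by simp
          rw [this]
          simp [List.getD]
      rw [hlast.1, hlast.2]
      have hrev : (l' ++ [y] ++ [x]).reverse = x :: y :: l'.reverse := by simp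
      have hrev2 : (l' ++ [y]).reverse = y :: l'.reverse := by simp
      rw [hrev]
      show (if y = x then brFold (l' ++ [y]) + 1 else 0) = tcount (x :: y :: l'.reverse)
      rw [show tcount (x :: y :: l'.reverse) = if x = y then 1 + tcount (y :: l'.reverse) else 0 from rfl,
        ih, hrev2]
      by_cases h : x = y
      · subst h; simp; ring
      · rw [if_neg h, if_neg (fun he => h he.symm)]

theorem func_sim_spec : Claim_equal_func_sim := by
  intro max_F itrConstF _
  unfold Spec_func_sim func_sim func_sim_alt
  have := brFold_eq_tcount_reverse max_F
  unfold brFold at this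
  simp only [this]
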